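-- pv_equiv track=rewrite | github.com/orez-/Advent-of-Code | day15/cleanup.py | path_to_next_unknown
-- ===== SOURCE A (Python) =====
-- import collections
--
-- WALL = 0
--
-- DIRECTIONS = {1: (0, -1), 2: (0, 1), 3: (-1, 0), 4: (1, 0)}
--
-- def rebuild_path(x, y, back):
--     path = []
--     while (x, y) in back:
--         x, y, direction = back[x, y]
--         path.append(direction)
--     return path[::-1]
--
-- def path_to_next_unknown(x, y, board):
--     """
--     Return the path of directions to walk to the next unexplored area.
--
--     If there are no more reachable unexplored areas `None` is returned.
--     """
--     queue = collections.deque([(x, y)])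
--     seen = {(x, y)}
--     back = {}
--     while queue:
--         px, py = queue.popleft()
--         if (px, py) not in board:
--             return rebuild_path(px, py, back)
--         for direction, (dx, dy) in DIRECTIONS.items():
--             dx += px
--             dy += py
--             if (dx, dy) in seen:
--                 continue
--             if board.get((dx, dy)) == WALL:
--                 continue
--             seen.add((dx, dy))
--             back[dx, dy] = (px, py, direction)
--             queue.append((dx, dy))
--     return None
-- ===== SOURCE B (Python) =====
-- import collections
--
-- WALL = 0
--
-- DIRECTIONS = {1: (0, -1), 2: (0, 1), 3: (-1, 0), 4: (1, 0)}
--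
-- def path_to_next_unknown(x, y, board):
--     """
--     Return the path of directions to walk to the next unexplored area.
--
--     If there are no more reachable unexplored areas `None` is returned.
--     """
--     queue = collections.deque([(x, y, [])])
--     seen = {(x, y)}
--     while queue:
--         px, py, path = queue.popleft()
--         if (px, py) not in board:
--             return path
--         for direction, (dx, dy) in DIRECTIONS.items():
--             dx += px
--             dy += py
--             if (dx, dy) in seen:
--                 continue
--             if board.get((dx, dy)) == WALL:
--                 continue
--             seen.add((dx, dy))
--             queue.append((dx, dy, path + [direction]))
--     return None
-- ===== Notes on version B (the rewrite author's own statement) =====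
-- stated objective: simpler
-- what changed: B drops A's back-pointer dict and the rebuild_path backward reconstruction: the BFS queue carries each cell's accumulated path forward, and the dequeued path is returned directly.
import Mathlib
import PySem

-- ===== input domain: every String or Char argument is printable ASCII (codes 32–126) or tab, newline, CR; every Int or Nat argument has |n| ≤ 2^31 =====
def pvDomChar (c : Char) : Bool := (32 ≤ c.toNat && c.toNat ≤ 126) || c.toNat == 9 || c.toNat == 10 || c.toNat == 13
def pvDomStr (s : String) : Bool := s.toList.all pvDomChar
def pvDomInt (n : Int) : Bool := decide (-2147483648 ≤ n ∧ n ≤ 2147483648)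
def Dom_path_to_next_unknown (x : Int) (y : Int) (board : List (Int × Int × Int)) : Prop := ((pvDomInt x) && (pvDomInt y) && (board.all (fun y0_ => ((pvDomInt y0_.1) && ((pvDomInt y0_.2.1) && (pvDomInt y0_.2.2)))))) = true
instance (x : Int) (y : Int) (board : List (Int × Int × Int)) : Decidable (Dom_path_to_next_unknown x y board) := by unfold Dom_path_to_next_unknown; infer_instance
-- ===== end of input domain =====

-- B replaces A's back-pointer dict and rebuild_path reconstruction by a BFS whose queue
-- carries the accumulated path forward (objective: simpler, same BFS order).

-- ===== PORT A =====
-- DIRECTIONS as its (insertion-ordered) item list: (direction, dx, dy)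
def pvDirs : List (Int × Int × Int) := [(1, 0, -1), (2, 0, 1), (3, -1, 0), (4, 1, 0)]

-- board is the Python dict {(x, y): v} flattened to triples (x, y, v); first-match lookup
def pvBoardGet? (board : List (Int × Int × Int)) (a b : Int) : Option Int :=
  match board with
  | [] => none
  | (p, q, v) :: rest => if p = a ∧ q = b then some v else pvBoardGet? rest a b

-- the 'while (x, y) in back' loop of rebuild_path; fuel back.size + 1 bounds the
-- (acyclic) back-pointer chain, path collected by append then reversed, as in Python
def pvRebuildLoop (back : PySem.Dict (Int × Int) (Int × Int × Int)) :
    Nat → Int → Int → List Int → List Int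
  | 0, _, _, path => path.reverse
  | n + 1, x, y, path =>
    match back.get? (x, y) with
    | none => path.reverse
    | some (nx, ny, d) => pvRebuildLoop back n nx ny (path ++ [d])

def pvRebuildPath (x y : Int) (back : PySem.Dict (Int × Int) (Int × Int × Int)) : List Int :=
  pvRebuildLoop back (back.size + 1) x y []

-- the body of A's 'for direction, (dx, dy) in DIRECTIONS.items()' loop
def pvStepA (board : List (Int × Int × Int)) (px py : Int)
    (st : List (Int × Int) × PySem.Set (Int × Int) × PySem.Dict (Int × Int) (Int × Int × Int))
    (dir : Int × Int × Int) :
    List (Int × Int) × PySem.Set (Int × Int) × PySem.Dict (Int × Int) (Int × Int × Int) :=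
  let (d, dx0, dy0) := dir
  let dx := dx0 + px
  let dy := dy0 + py
  if (dx, dy) ∈ st.2.1 then st
  else if pvBoardGet? board dx dy = some 0 then st
  else (st.1 ++ [(dx, dy)], PySem.Set.add st.2.1 (dx, dy), st.2.2.insert (dx, dy) (px, py, d))

-- A's 'while queue' loop; fuel board.length + 2 exceeds the number of dequeues
-- (every dequeued cell is distinct, and all but the last are board keys)
def pvBfsA (board : List (Int × Int × Int)) :
    Nat → List (Int × Int) → PySem.Set (Int × Int) →
    PySem.Dict (Int × Int) (Int × Int × Int) → Option (List Int)
  | 0, _, _, _ => none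
  | n + 1, queue, seen, back =>
    match queue with
    | [] => none
    | (px, py) :: rest =>
      if pvBoardGet? board px py = none then some (pvRebuildPath px py back)
      else
        let st := pvDirs.foldl (pvStepA board px py) (rest, seen, back)
        pvBfsA board n st.1 st.2.1 st.2.2

def path_to_next_unknown (x : Int) (y : Int) (board : List (Int × Int × Int)) : Option (List Int) :=
  pvBfsA board (board.length + 2) [(x, y)] (PySem.Set.ofList [(x, y)]) PySem.Dict.empty

-- ===== PORT B =====
-- B's inner loop: enqueue the neighbor together with its extended path
def pvStepB (board : List (Int × Int × Int)) (px py : Int) (path : List Int)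
    (st : List ((Int × Int) × List Int) × PySem.Set (Int × Int))
    (dir : Int × Int × Int) :
    List ((Int × Int) × List Int) × PySem.Set (Int × Int) :=
  let (d, dx0, dy0) := dir
  let dx := dx0 + px
  let dy := dy0 + py
  if (dx, dy) ∈ st.2 then st
  else if pvBoardGet? board dx dy = some 0 then st
  else (st.1 ++ [((dx, dy), path ++ [d])], PySem.Set.add st.2 (dx, dy))

-- B's 'while queue' loop: no back map, the dequeued path is returned directly
def pvBfsB (board : List (Int × Int × Int)) :
    Nat → List ((Int × Int) × List Int) → PySem.Set (Int × Int) → Option (List Int)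
  | 0, _, _ => none
  | n + 1, queue, seen =>
    match queue with
    | [] => none
    | ((px, py), path) :: rest =>
      if pvBoardGet? board px py = none then some path
      else
        let st := pvDirs.foldl (pvStepB board px py path) (rest, seen)
        pvBfsB board n st.1 st.2

def path_to_next_unknown_alt (x : Int) (y : Int) (board : List (Int × Int × Int)) : Option (List Int) :=
  pvBfsB board (board.length + 2) [((x, y), [])] (PySem.Set.ofList [(x, y)])

-- ===== PRECONDITION & SPEC =====
def Spec_path_to_next_unknown (x : Int) (y : Int) (board : List (Int × Int × Int)) (out : Option (List Int)) : Prop := out = path_to_next_unknown_alt x y board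
instance (x : Int) (y : Int) (board : List (Int × Int × Int)) (out : Option (List Int)) : Decidable (Spec_path_to_next_unknown x y board out) := by unfold Spec_path_to_next_unknown; infer_instance

-- ===== CLAIM (what is proved, stated in full; the proofs are below) =====
def Claim_equal_path_to_next_unknown : Prop := ∀ (x : Int) (y : Int) (board : List (Int × Int × Int)), Dom_path_to_next_unknown x y board → Spec_path_to_next_unknown x y board (path_to_next_unknown x y board)

-- ===== LEMMAS AND PROOFS =====

-- RB back seen n c p: the back-pointer chain from c terminates within n lookups,
-- every cell on it (terminal included) is in seen, and the forward path it encodes is p.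
def RB (back : PySem.Dict (Int × Int) (Int × Int × Int)) (seen : PySem.Set (Int × Int)) :
    Nat → (Int × Int) → List Int → Prop
  | 0, _, _ => False
  | n + 1, c, p => c ∈ seen ∧
      (match back.get? c with
       | none => p = []
       | some (nx, ny, d) => ∃ q, p = q ++ [d] ∧ RB back seen n (nx, ny) q)

theorem RB_mono {back seen} {n m : Nat} {c p} (h : RB back seen n c p) (hnm : n ≤ m) :
    RB back seen m c p := by
  induction n generalizing m c p with
  | zero => exact absurd h (by simp [RB])
  | succ n ih =>
    obtain ⟨m, rfl⟩ : ∃ m', m = m' + 1 := ⟨m - 1, by omega⟩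
    obtain ⟨hc, hrest⟩ := h
    refine ⟨hc, ?_⟩
    cases hg : back.get? c with
    | none => simpa [hg] using hrest
    | some v =>
      obtain ⟨nx, ny, d⟩ := v
      simp only [hg] at hrest ⊢
      obtain ⟨q, rfl, hq⟩ := hrest
      exact ⟨q, rfl, ih hq (by omega)⟩

theorem RB_seen {back seen seen'} {n : Nat} {c p} (h : RB back seen n c p)
    (hs : ∀ z ∈ seen, z ∈ seen') : RB back seen' n c p := by
  induction n generalizing c p with
  | zero => exact absurd h (by simp [RB])
  | succ n ih =>
    obtain ⟨hc, hrest⟩ := h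
    refine ⟨hs _ hc, ?_⟩
    cases hg : back.get? c with
    | none => simpa [hg] using hrest
    | some v =>
      obtain ⟨nx, ny, d⟩ := v
      simp only [hg] at hrest ⊢
      obtain ⟨q, rfl, hq⟩ := hrest
      exact ⟨q, rfl, ih hq⟩

theorem RB_insert {back seen} {n : Nat} {c p} {k : Int × Int} {v}
    (hk : k ∉ seen) (h : RB back seen n c p) : RB (back.insert k v) seen n c p := by
  induction n generalizing c p with
  | zero => exact absurd h (by simp [RB])
  | succ n ih =>
    obtain ⟨hc, hrest⟩ := h
    have hne : c ≠ k := fun he => hk (he ▸ hc)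
    refine ⟨hc, ?_⟩
    rw [PySem.Dict.get?_insert_of_ne _ _ hne]
    cases hg : back.get? c with
    | none => simpa [hg] using hrest
    | some w =>
      obtain ⟨nx, ny, d⟩ := w
      simp only [hg] at hrest ⊢
      obtain ⟨q, rfl, hq⟩ := hrest
      exact ⟨q, rfl, ih hq⟩

theorem RB_eval {back seen} {n : Nat} {c : Int × Int} {p} (h : RB back seen n c p) :
    ∀ f, n ≤ f → ∀ acc, pvRebuildLoop back f c.1 c.2 acc = (acc ++ p.reverse).reverse := by
  induction n generalizing c p with
  | zero => exact absurd h (by simp [RB])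
  | succ n ih =>
    intro f hf acc
    obtain ⟨f, rfl⟩ : ∃ f', f = f' + 1 := ⟨f - 1, by omega⟩
    obtain ⟨-, hrest⟩ := h
    cases hg : back.get? (c.1, c.2) with
    | none =>
      have : back.get? c = none := by simpa using hg
      rw [this] at hrest
      subst hrest
      simp [pvRebuildLoop, hg]
    | some w =>
      obtain ⟨nx, ny, d⟩ := w
      have : back.get? c = some (nx, ny, d) := by simpa using hg
      rw [this] at hrest
      obtain ⟨q, rfl, hq⟩ := hrest
      simp only [pvRebuildLoop, hg]
      rw [ih hq f (by omega) (acc ++ [d])]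
      simp

-- the BFS invariant tying A's (queue, seen, back) to B's (queue', seen)
def pvInv (back : PySem.Dict (Int × Int) (Int × Int × Int)) (seen : PySem.Set (Int × Int))
    (qA : List (Int × Int)) (qB : List ((Int × Int) × List Int)) : Prop :=
  qB.map Prod.fst = qA ∧
  (∀ e ∈ qB, RB back seen (back.size + 1) e.1 e.2) ∧
  (∀ k : Int × Int, back.contains k = true → k ∈ seen)

theorem step_inv (board : List (Int × Int × Int)) (px py : Int) (path : List Int)
    (dir : Int × Int × Int) :
    ∀ (qA : List (Int × Int)) (qB : List ((Int × Int) × List Int))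
      (seen : PySem.Set (Int × Int)) (back : PySem.Dict (Int × Int) (Int × Int × Int)),
      pvInv back seen qA qB → RB back seen (back.size + 1) (px, py) path →
      (pvStepA board px py (qA, seen, back) dir).2.1 = (pvStepB board px py path (qB, seen) dir).2 ∧
      pvInv (pvStepA board px py (qA, seen, back) dir).2.2
          (pvStepA board px py (qA, seen, back) dir).2.1
          (pvStepA board px py (qA, seen, back) dir).1
          (pvStepB board px py path (qB, seen) dir).1 ∧
      RB (pvStepA board px py (qA, seen, back) dir).2.2
         (pvStepA board px py (qA, seen, back) dir).2.1
         ((pvStepA board px py (qA, seen, back) dir).2.2.size + 1) (px, py) path := by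
  intro qA qB seen back hInv hpar
  obtain ⟨hmap, hRB, hkeys⟩ := hInv
  obtain ⟨d, dx0, dy0⟩ := dir
  simp only [pvStepA, pvStepB]
  by_cases hmem : (dx0 + px, dy0 + py) ∈ seen
  · simp only [hmem, if_pos]
    exact ⟨by simp, ⟨hmap, hRB, hkeys⟩, hpar⟩
  · simp only [hmem, if_neg, not_false_eq_true]
    by_cases hwall : pvBoardGet? board (dx0 + px) (dy0 + py) = some 0
    · simp only [hwall, if_pos]
      exact ⟨by simp, ⟨hmap, hRB, hkeys⟩, hpar⟩
    · simp only [hwall, if_neg, not_false_eq_true]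
      set k : Int × Int := (dx0 + px, dy0 + py) with hk
      have hnotc : back.contains k = false := by
        cases hc : back.contains k with
        | false => rfl
        | true => exact absurd (hkeys k hc) hmem
      have hsize : (back.insert k (px, py, d)).size = back.size + 1 := by
        rw [PySem.Dict.size_insert]
        simp [hnotc]
      have hsub : ∀ z ∈ seen, z ∈ PySem.Set.add seen k := by
        intro z hz; exact (PySem.Set.mem_add _ _ _).mpr (Or.inl hz)
      have lift : ∀ c q, RB back seen (back.size + 1) c q →
          RB (back.insert k (px, py, d)) (PySem.Set.add seen k)
            ((back.insert k (px, py, d)).size + 1) c q := by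
        intro c q hq
        rw [hsize]
        exact RB_mono (RB_seen (RB_insert hmem hq) hsub) (by omega)
      refine ⟨by simp, ⟨?_, ?_, ?_⟩, lift _ _ hpar⟩
      · simp [hmap]
      · intro e he
        rcases List.mem_append.mp he with h1 | h1
        · exact lift _ _ (hRB e h1)
        · simp only [List.mem_singleton] at h1
          subst h1
          rw [hsize]
          refine ⟨(PySem.Set.mem_add _ _ _).mpr (Or.inr rfl), ?_⟩
          rw [show ((k, path ++ [d]) : (Int × Int) × List Int).1 = k from rfl,
            PySem.Dict.get?_insert_self]
          exact ⟨path, rfl, RB_seen (RB_insert hmem hpar) hsub⟩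
      · intro k' hk'
        rw [PySem.Dict.contains_insert] at hk'
        rcases Bool.or_eq_true_iff.mp hk' with h1 | h1
        · exact (PySem.Set.mem_add _ _ _).mpr (Or.inr (by simpa using h1))
        · exact hsub _ (hkeys k' h1)

theorem fold_inv (board : List (Int × Int × Int)) (px py : Int) (path : List Int) :
    ∀ (dirs : List (Int × Int × Int)) (qA : List (Int × Int))
      (qB : List ((Int × Int) × List Int)) (seen : PySem.Set (Int × Int))
      (back : PySem.Dict (Int × Int) (Int × Int × Int)),
      pvInv back seen qA qB → RB back seen (back.size + 1) (px, py) path →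
      (dirs.foldl (pvStepA board px py) (qA, seen, back)).2.1 =
        (dirs.foldl (pvStepB board px py path) (qB, seen)).2 ∧
      pvInv (dirs.foldl (pvStepA board px py) (qA, seen, back)).2.2
          (dirs.foldl (pvStepA board px py) (qA, seen, back)).2.1
          (dirs.foldl (pvStepA board px py) (qA, seen, back)).1
          (dirs.foldl (pvStepB board px py path) (qB, seen)).1 := by
  intro dirs
  induction dirs with
  | nil => intro qA qB seen back hInv _; exact ⟨rfl, hInv⟩
  | cons dir dirs ih =>
    intro qA qB seen back hInv hpar
    obtain ⟨hseen, hInv', hpar'⟩ := step_inv board px py path dir qA qB seen back hInv hpar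
    simp only [List.foldl_cons]
    have hA : pvStepA board px py (qA, seen, back) dir =
        ((pvStepA board px py (qA, seen, back) dir).1,
         (pvStepA board px py (qA, seen, back) dir).2.1,
         (pvStepA board px py (qA, seen, back) dir).2.2) := rfl
    have hB : pvStepB board px py path (qB, seen) dir =
        ((pvStepB board px py path (qB, seen) dir).1,
         (pvStepB board px py path (qB, seen) dir).2) := rfl
    rw [hA, hB, ← hseen]
    exact ih _ _ _ _ hInv' (by rw [hseen] at hpar' ⊢; exact hpar')

theorem bfs_eq (board : List (Int × Int × Int)) :
    ∀ (fuel : Nat) (qA : List (Int × Int)) (qB : List ((Int × Int) × List Int))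
      (seen : PySem.Set (Int × Int)) (back : PySem.Dict (Int × Int) (Int × Int × Int)),
      pvInv back seen qA qB →
      pvBfsA board fuel qA seen back = pvBfsB board fuel qB seen := by
  intro fuel
  induction fuel with
  | zero => intro qA qB seen back _; rfl
  | succ n ih =>
    intro qA qB seen back hInv
    obtain ⟨hmap, hRB, hkeys⟩ := hInv
    cases qB with
    | nil =>
      have : qA = [] := by simpa using hmap.symm
      subst this; rfl
    | cons e restB =>
      obtain ⟨⟨px, py⟩, path⟩ := e
      obtain ⟨restA, rfl, hrest⟩ : ∃ restA, qA = (px, py) :: restA ∧ restB.map Prod.fst = restA := by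
        cases qA with
        | nil => simp at hmap
        | cons a restA =>
          simp only [List.map_cons, List.cons.injEq] at hmap
          exact ⟨restA, by rw [← hmap.1], hmap.2⟩
      have hparRB : RB back seen (back.size + 1) (px, py) path := hRB _ List.mem_cons_self
      simp only [pvBfsA, pvBfsB]
      by_cases hb : pvBoardGet? board px py = none
      · simp only [hb, if_pos]
        have := RB_eval hparRB (back.size + 1) le_rfl []
        simp only [List.nil_append, List.reverse_reverse] at this
        rw [pvRebuildPath, this]
      · simp only [hb, if_neg, not_false_eq_true]
        have hInvRest : pvInv back seen restA restB :=
          ⟨hrest, fun e he => hRB e (List.mem_cons_of_mem _ he), hkeys⟩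
        obtain ⟨hseen', hInv'⟩ := fold_inv board px py path pvDirs restA restB seen back hInvRest hparRB
        rw [← hseen']
        exact ih _ _ _ _ hInv'

-- ===== VERDICT (by name: the statement is the Claim_ definition above) =====
theorem path_to_next_unknown_spec : Claim_equal_path_to_next_unknown := by
  intro x y board _
  show path_to_next_unknown x y board = path_to_next_unknown_alt x y board
  apply bfs_eq
  refine ⟨rfl, ?_, ?_⟩
  · intro e he
    simp only [List.mem_singleton] at he
    subst he
    exact ⟨by simp [PySem.Set.ofList], by simp [PySem.Dict.get?_empty]⟩
  · intro k hk
    simp [PySem.Dict.contains_empty] at hk
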